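-- pv_equiv track=rewrite | github.com/MandalaCloud/HeaderSplit | source_code/backend/code_element_graph_construction/utils.py | seperate_by_non_identifier
-- ===== SOURCE A (Python) =====
-- def seperate_by_non_identifier(string):
--     result = []
--     start = 0
--     for i in range(len(string)):
--         if not string[i].isalnum() and string[i] != "_":
--             if start != i:
--                 result.append(string[start:i])
--             start = i + 1
--     if start != len(string):
--         result.append(string[start:])
--     return result
-- ===== SOURCE B (Python) =====
-- def seperate_by_non_identifier(string):
--     result = []
--     cur = []
--     for ch in string:
--         if ch.isalnum() or ch == "_":
--             cur.append(ch)
--         else: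
--             if cur:
--                 result.append("".join(cur))
--                 cur = []
--     if cur:
--         result.append("".join(cur))
--     return result
-- ===== Notes on version B (the rewrite author's own statement) =====
-- stated objective: alternative
-- what changed: A tracks a start index and slices string[start:i] out of the original; B folds over the characters themselves accumulating the current token in a buffer and flushing it at each delimiter, with no indices or slicing.
import Mathlib
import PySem

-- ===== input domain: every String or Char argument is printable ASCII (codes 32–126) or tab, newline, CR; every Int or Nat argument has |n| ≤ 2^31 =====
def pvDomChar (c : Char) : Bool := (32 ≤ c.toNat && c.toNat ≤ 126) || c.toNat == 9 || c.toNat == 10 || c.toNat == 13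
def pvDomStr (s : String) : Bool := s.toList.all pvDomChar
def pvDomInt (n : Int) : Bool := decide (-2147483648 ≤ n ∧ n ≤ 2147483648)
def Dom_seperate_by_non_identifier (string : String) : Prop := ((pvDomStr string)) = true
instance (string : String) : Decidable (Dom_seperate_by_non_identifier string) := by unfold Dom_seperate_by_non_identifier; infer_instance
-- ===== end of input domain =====

-- B replaces A's start-index-and-slice scan by a character-buffer accumulator fold (alternative decomposition, same cost).

-- ===== PORT A =====
-- A's loop body: at index i, on a non-identifier char flush string[start:i] (if non-empty) and reset start
def pvBodyA (cs : List Char) (st : List String × Nat) (i : Nat) : List String × Nat :=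
  let c := cs.getD i ' '
  if ¬ (PySem.Chars.isalnum c = true) ∧ c ≠ '_' then
    (if st.2 ≠ i then st.1 ++ [String.ofList (PySem.List.slice cs (some (st.2 : Int)) (some (i : Int)))] else st.1,
     i + 1)
  else st

def seperate_by_non_identifier (string : String) : List String :=
  let cs := string.toList
  let st := (List.range cs.length).foldl (pvBodyA cs) ([], 0)
  if st.2 ≠ cs.length then st.1 ++ [String.ofList (PySem.List.slice cs (some (st.2 : Int)) none)] else st.1

-- ===== PORT B =====
-- B's loop body: accumulate identifier chars in a buffer, flush the buffer at each delimiter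
def pvBodyB (st : List String × List Char) (c : Char) : List String × List Char :=
  if PySem.Chars.isalnum c || c == '_' then (st.1, st.2 ++ [c])
  else if st.2 ≠ [] then (st.1 ++ [String.ofList st.2], []) else st

def seperate_by_non_identifier_alt (string : String) : List String :=
  let st := string.toList.foldl pvBodyB ([], [])
  if st.2 ≠ [] then st.1 ++ [String.ofList st.2] else st.1

-- ===== PRECONDITION & SPEC =====
def Spec_seperate_by_non_identifier (string : String) (out : List String) : Prop := out = seperate_by_non_identifier_alt string
instance (string : String) (out : List String) : Decidable (Spec_seperate_by_non_identifier string out) := by unfold Spec_seperate_by_non_identifier; infer_instance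

-- ===== CLAIM (what is proved, stated in full; the proofs are below) =====
def Claim_equal_seperate_by_non_identifier : Prop := ∀ (string : String), Dom_seperate_by_non_identifier string → Spec_seperate_by_non_identifier string (seperate_by_non_identifier string)

-- ===== LEMMAS AND PROOFS =====

-- slicing is stable under appending a char at or past the slice's end
lemma pv_slice_append (cs : List Char) (c : Char) (s i : Nat) (hi : i ≤ cs.length) :
    PySem.List.slice (cs ++ [c]) (some (s : Int)) (some (i : Int))
      = PySem.List.slice cs (some (s : Int)) (some (i : Int)) := by
  rw [PySem.List.slice_natCast, PySem.List.slice_natCast]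
  by_cases h : s ≤ i
  · have hs : s ≤ cs.length := le_trans h hi
    rw [List.drop_append_of_le_length hs]
    rw [List.take_append_of_le_length (by simp [List.length_drop]; omega)]
  · rw [Nat.sub_eq_zero_of_le (by omega)]
    simp

-- the loop bodies over cs and over cs ++ [c] agree on indices < |cs|
lemma pv_bodyA_append (cs : List Char) (c : Char) (st : List String × Nat) (i : Nat)
    (hi : i < cs.length) : pvBodyA (cs ++ [c]) st i = pvBodyA cs st i := by
  unfold pvBodyA
  rw [List.getD_append _ _ _ _ hi, pv_slice_append cs c st.2 i (le_of_lt hi)]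

-- the invariant relating the two loop states is preserved by one step
lemma pv_step (cs : List Char) (c : Char) (stA : List String × Nat) (stB : List String × List Char)
    (h1 : stA.1 = stB.1) (h2 : stA.2 ≤ cs.length) (h3 : stB.2 = cs.drop stA.2) :
    (pvBodyA (cs ++ [c]) stA cs.length).1 = (pvBodyB stB c).1
    ∧ (pvBodyA (cs ++ [c]) stA cs.length).2 ≤ (cs ++ [c]).length
    ∧ (pvBodyB stB c).2 = (cs ++ [c]).drop (pvBodyA (cs ++ [c]) stA cs.length).2 := by
  obtain ⟨res, start⟩ := stA
  obtain ⟨res', buf⟩ := stB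
  simp only at h1 h2 h3
  subst h1
  have hgetD : (cs ++ [c]).getD cs.length ' ' = c := by
    simp [List.getD_eq_getElem?_getD]
  have hslice : PySem.List.slice (cs ++ [c]) (some (start : Int)) (some (cs.length : Int))
      = buf := by
    rw [PySem.List.slice_natCast, List.drop_append_of_le_length h2]
    rw [List.take_append_of_le_length (by simp [List.length_drop])]
    rw [List.take_of_length_le (by simp [List.length_drop])]
    exact h3.symm
  have hempty : buf = [] ↔ start = cs.length := by
    rw [h3, List.drop_eq_nil_iff]; omega
  unfold pvBodyA pvBodyB
  rw [hgetD]
  by_cases hid : (PySem.Chars.isalnum c || c == '_') = true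
  · have hA : ¬ (¬ (PySem.Chars.isalnum c = true) ∧ c ≠ '_') := by
      simp only [Bool.or_eq_true, beq_iff_eq] at hid; tauto
    rw [if_neg hA, if_pos hid]
    refine ⟨rfl, by simp; omega, ?_⟩
    simp only
    rw [h3, List.drop_append_of_le_length h2]
  · have hA : ¬ (PySem.Chars.isalnum c = true) ∧ c ≠ '_' := by
      simp only [Bool.or_eq_true, beq_iff_eq, not_or] at hid; exact ⟨hid.1, hid.2⟩
    rw [if_pos hA, if_neg hid]
    by_cases hs : start = cs.length
    · have hb : buf = [] := hempty.mpr hs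
      rw [if_neg (by omega : ¬ start ≠ cs.length), if_neg (by simp [hb])]
      refine ⟨rfl, by simp, ?_⟩
      simp only
      rw [h3, hs]
      simp
    · have hb : buf ≠ [] := fun h => hs (hempty.mp h)
      rw [if_pos hs, if_pos hb]
      refine ⟨by simp only; rw [hslice], by simp, ?_⟩
      simp

-- the joint invariant of the two folds
lemma pv_inv (cs : List Char) :
    ((List.range cs.length).foldl (pvBodyA cs) ([], 0)).1 = (cs.foldl pvBodyB ([], [])).1
    ∧ ((List.range cs.length).foldl (pvBodyA cs) ([], 0)).2 ≤ cs.length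
    ∧ (cs.foldl pvBodyB ([], [])).2
        = cs.drop ((List.range cs.length).foldl (pvBodyA cs) ([], 0)).2 := by
  induction cs using List.reverseRecOn with
  | nil => simp
  | append_singleton cs c ih =>
    obtain ⟨h1, h2, h3⟩ := ih
    have hrange : (List.range (cs ++ [c]).length).foldl (pvBodyA (cs ++ [c])) ([], 0)
        = pvBodyA (cs ++ [c]) ((List.range cs.length).foldl (pvBodyA cs) ([], 0)) cs.length := by
      rw [List.length_append, List.length_singleton, List.range_succ, List.foldl_append,
        PySem.List.foldl_congr_mem (List.range cs.length) (pvBodyA (cs ++ [c])) (pvBodyA cs) ([], 0)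
          (fun st i hi => pv_bodyA_append cs c st i (List.mem_range.mp hi))]
      rfl
    have hfoldB : (cs ++ [c]).foldl pvBodyB ([], []) = pvBodyB (cs.foldl pvBodyB ([], [])) c := by
      rw [List.foldl_append]; rfl
    rw [hrange, hfoldB]
    exact pv_step cs c _ _ h1 h2 h3

-- the two tail flushes agree under the invariant
lemma pv_final (cs : List Char) (res : List String) (start : Nat) (buf : List Char)
    (h2 : start ≤ cs.length) (h3 : buf = cs.drop start) :
    (if start ≠ cs.length then res ++ [String.ofList (PySem.List.slice cs (some (start : Int)) none)] else res)
      = (if buf ≠ [] then res ++ [String.ofList buf] else res) := by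
  have hempty : buf = [] ↔ start = cs.length := by
    rw [h3, List.drop_eq_nil_iff]; omega
  by_cases hs : start = cs.length
  · rw [if_neg (by omega : ¬ start ≠ cs.length), if_neg (by simp [hempty.mpr hs])]
  · have hb : buf ≠ [] := fun h => hs (hempty.mp h)
    rw [if_pos hs, if_pos hb, PySem.List.slice_from_natCast, h3]

-- ===== VERDICT (by name: the statement is the Claim_ definition above) =====
theorem seperate_by_non_identifier_spec : Claim_equal_seperate_by_non_identifier := by
  intro string _
  unfold Spec_seperate_by_non_identifier seperate_by_non_identifier seperate_by_non_identifier_alt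
  obtain ⟨h1, h2, h3⟩ := pv_inv string.toList
  simp only []
  rw [h1]
  exact pv_final string.toList _ _ _ h2 h3
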